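-- pv_equiv track=rewrite | github.com/jr-robotics/MorphologicalPPO | src/envs/spaces.py | get_common_shape
-- ===== SOURCE A (Python) =====
-- def get_common_shape(shapes):
--
--     dims = set([len(shape) for shape in shapes])
--     assert len(dims) == 1, "All shapes must have the same number of dimensions."
--     dims = dims.pop()
--
--     if dims == 1:
--         return shapes[0] if len(set(shapes)) == 1 else (1,)
--     else:
--         first_shape = shapes[0]
--         assert all(len(shape) == len(first_shape) for shape in shapes), \
--             "All shapes must have the same number of dimensions."
--
--         common_shape = []
--         for i in range(len(first_shape)):
--             unique_dims = set(shape[i] for shape in shapes)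
--             if len(unique_dims) == 1:
--                 common_shape.append(unique_dims.pop())
--
--     return tuple(common_shape)
-- ===== SOURCE B (Python) =====
-- def get_common_shape(shapes):
--     dims = set([len(shape) for shape in shapes])
--     assert len(dims) == 1, "All shapes must have the same number of dimensions."
--     dims = dims.pop()
--
--     if dims == 1:
--         return shapes[0] if len(set(shapes)) == 1 else (1,)
--
--     first = shapes[0]
--     differs = [False] * len(first)
--     for shape in shapes:
--         differs = [d or s != f for d, s, f in zip(differs, shape, first)]
--     return tuple(f for f, d in zip(first, differs) if not d)
-- ===== Notes on version B (the rewrite author's own statement) =====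
-- stated objective: alternative
-- what changed: The multi-dim case is computed by a single row-major sweep over the shapes maintaining a boolean differs-mask (then filtering the first shape by the mask) instead of building a fresh set per dimension by re-scanning all shapes column by column.
import Mathlib
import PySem

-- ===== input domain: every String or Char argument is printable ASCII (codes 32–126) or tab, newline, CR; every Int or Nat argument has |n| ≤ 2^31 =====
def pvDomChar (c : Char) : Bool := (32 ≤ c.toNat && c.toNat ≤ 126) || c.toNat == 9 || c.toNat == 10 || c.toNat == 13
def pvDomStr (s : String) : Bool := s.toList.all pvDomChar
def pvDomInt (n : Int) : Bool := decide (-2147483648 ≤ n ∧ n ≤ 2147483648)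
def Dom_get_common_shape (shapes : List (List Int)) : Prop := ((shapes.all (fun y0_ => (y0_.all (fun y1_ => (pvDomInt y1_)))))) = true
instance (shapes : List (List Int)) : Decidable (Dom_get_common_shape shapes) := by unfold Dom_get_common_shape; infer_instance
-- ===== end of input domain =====

-- B computes the multi-dim case in one row-major sweep maintaining a boolean differs-mask
-- (then filters the first shape by the mask), instead of A's per-dimension column set-building.

-- ===== PORT A =====
def get_common_shape (shapes : List (List Int)) : List Int :=
  let dims : PySem.Set Int := PySem.Set.ofList (shapes.map (fun s => (s.length : Int)))
  if dims.length = 1 then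
    let d := dims.headD 0
    if d = 1 then
      if (PySem.Set.ofList shapes).length = 1 then shapes.headD [] else [1]
    else
      let first := shapes.headD []
      (List.range first.length).foldl (fun acc i =>
        let u : PySem.Set Int := PySem.Set.ofList (shapes.map (fun s => s.getD i 0))
        if u.length = 1 then acc ++ [u.headD 0] else acc) []
  else []  -- assert fails (AssertionError): excluded by Pre_

-- ===== PORT B =====
def get_common_shape_alt (shapes : List (List Int)) : List Int :=
  let dims : PySem.Set Int := PySem.Set.ofList (shapes.map (fun s => (s.length : Int)))
  if dims.length = 1 then
    if dims.headD 0 = 1 then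
      if (PySem.Set.ofList shapes).length = 1 then shapes.headD [] else [1]
    else
      let first := shapes.headD []
      let differs := shapes.foldl
        (fun ds shape =>
          List.zipWith (fun (p : Bool × Int) f => p.1 || decide (p.2 ≠ f)) (ds.zip shape) first)
        (List.replicate first.length false)
      (first.zip differs).filterMap (fun p => if p.2 then none else some p.1)
  else []  -- assert fails (AssertionError): excluded by Pre_

-- ===== PRECONDITION & SPEC =====
-- Pre_ excludes exactly the inputs on which A raises AssertionError: the empty list and
-- lists whose shapes do not all have the same length (B raises there too).
def Pre_get_common_shape (shapes : List (List Int)) : Prop :=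
  shapes ≠ [] ∧ ∀ s ∈ shapes, s.length = (shapes.headD []).length
instance (shapes : List (List Int)) : Decidable (Pre_get_common_shape shapes) := by
  unfold Pre_get_common_shape; infer_instance

def pvWitness_get_common_shape : List (List Int) := [[2, 3], [2, 4]]

def Spec_get_common_shape (shapes : List (List Int)) (out : List Int) : Prop := out = get_common_shape_alt shapes
instance (shapes : List (List Int)) (out : List Int) : Decidable (Spec_get_common_shape shapes out) := by unfold Spec_get_common_shape; infer_instance

-- ===== CLAIM (what is proved, stated in full; the proofs are below) =====
def Claim_equal_get_common_shape : Prop := ∀ (shapes : List (List Int)), Dom_get_common_shape shapes → Pre_get_common_shape shapes → Spec_get_common_shape shapes (get_common_shape shapes)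

-- ===== LEMMAS AND PROOFS =====

lemma foldl_add_const {α : Type} [DecidableEq α] (a : α) (l : List α) (h : ∀ b ∈ l, b = a) :
    l.foldl PySem.Set.add [a] = [a] := by
  induction l with
  | nil => rfl
  | cons b t ih =>
    have hb : b = a := h b (by simp)
    subst hb
    have h1 : PySem.Set.add [b] b = [b] := by simp [PySem.Set.add, PySem.Set.contains]
    simpa [List.foldl, h1] using ih (fun x hx => h x (by simp [hx]))

lemma ofList_const {α : Type} [DecidableEq α] (a : α) (l : List α)
    (h : ∀ b ∈ l, b = a) : PySem.Set.ofList (a :: l) = [a] := by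
  have h2 : PySem.Set.ofList (a :: l) = l.foldl PySem.Set.add (PySem.Set.add [] a) := rfl
  rw [h2]
  have h0 : PySem.Set.add ([] : List α) a = [a] := by simp [PySem.Set.add, PySem.Set.contains]
  rw [h0]
  exact foldl_add_const a l h

lemma ofList_length_one_iff {α : Type} [DecidableEq α] (a : α) (l : List α) :
    (PySem.Set.ofList (a :: l)).length = 1 ↔ ∀ b ∈ l, b = a := by
  constructor
  · intro h1 b hb
    obtain ⟨x, hx⟩ := List.length_eq_one_iff.mp h1
    have ha : a ∈ PySem.Set.ofList (a :: l) := by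
      rw [PySem.Set.mem_ofList]; simp
    have hbm : b ∈ PySem.Set.ofList (a :: l) := by
      rw [PySem.Set.mem_ofList]; simp [hb]
    rw [hx] at ha hbm
    simp at ha hbm
    exact hbm.trans ha.symm
  · intro h; rw [ofList_const a l h]; rfl

lemma mask_step (first s : List Int) (ds : List Bool)
    (hds : ds.length = first.length) (hs : first.length ≤ s.length) :
    List.zipWith (fun (p : Bool × Int) f => p.1 || decide (p.2 ≠ f)) (ds.zip s) first
      = (List.range first.length).map
          (fun i => ds.getD i false || decide (s.getD i 0 ≠ first.getD i 0)) := by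
  apply List.ext_getElem
  · simp; omega
  · intro i h1 h2
    simp only [List.getElem_zipWith, List.getElem_zip, List.getElem_map, List.getElem_range]
    have hi : i < first.length := by simpa using h2
    rw [List.getD_eq_getElem ds false (by omega), List.getD_eq_getElem s 0 (by omega),
        List.getD_eq_getElem first 0 (by omega)]

lemma mask_fold (ss : List (List Int)) (first : List Int) (ds : List Bool)
    (hds : ds.length = first.length) (hss : ∀ s ∈ ss, first.length ≤ s.length) :
    ss.foldl
        (fun ds shape =>
          List.zipWith (fun (p : Bool × Int) f => p.1 || decide (p.2 ≠ f)) (ds.zip shape) first)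
        ds
      = (List.range first.length).map
          (fun i => ds.getD i false || ss.any (fun s => decide (s.getD i 0 ≠ first.getD i 0))) := by
  induction ss generalizing ds with
  | nil =>
    simp only [List.foldl_nil, List.any_nil, Bool.or_false]
    apply List.ext_getElem
    · simp [hds]
    · intro i h1 h2
      simp only [List.getElem_map, List.getElem_range]
      rw [List.getD_eq_getElem ds false (by omega)]
  | cons s t ih =>
    rw [List.foldl_cons, mask_step first s ds hds (hss s (by simp))]
    rw [ih _ (by simp) (fun x hx => hss x (by simp [hx]))]
    apply List.map_congr_left
    intro i hi
    have hi' : i < first.length := List.mem_range.mp hi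
    rw [List.getD_eq_getElem _ false (by simpa using hi')]
    simp only [List.getElem_map, List.getElem_range, List.any_cons, Bool.or_assoc]

lemma filter_map_eq_filterMap {α β : Type} (p : α → Bool) (f : α → β) (l : List α) :
    (l.filter p).map f = l.filterMap (fun a => if p a then some (f a) else none) := by
  induction l with
  | nil => rfl
  | cons a t ih =>
    by_cases h : p a <;> simp [h, ih]

lemma zip_map_range {α β : Type} [Inhabited α] (first : List α) (g : ℕ → β) (d : α) :
    first.zip ((List.range first.length).map g)
      = (List.range first.length).map (fun i => (first.getD i d, g i)) := by
  apply List.ext_getElem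
  · simp
  · intro i h1 h2
    simp only [List.getElem_zip, List.getElem_map, List.getElem_range]
    rw [List.getD_eq_getElem first d (by simpa using h2)]

lemma get_common_shape_eq_alt (shapes : List (List Int))
    (hne : shapes ≠ [])
    (hlen : ∀ s ∈ shapes, s.length = (shapes.headD []).length) :
    get_common_shape shapes = get_common_shape_alt shapes := by
  obtain ⟨f, rest, rfl⟩ := List.exists_cons_of_ne_nil hne
  have hdims : PySem.Set.ofList ((f :: rest).map (fun s => ((s.length : Int)))) = [(f.length : Int)] := by
    rw [List.map_cons]
    apply ofList_const
    intro b hb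
    obtain ⟨s, hs, rfl⟩ := List.mem_map.mp hb
    have := hlen s (by simp [hs])
    simp at this ⊢
    omega
  unfold get_common_shape get_common_shape_alt
  simp only [hdims, List.length_cons, List.headD_cons]
  have h01 : ([] : List Int).length + 1 = 1 := rfl
  rw [if_pos h01, if_pos h01]
  by_cases hf1 : (f.length : Int) = 1
  · rw [if_pos hf1, if_pos hf1]
  · rw [if_neg hf1, if_neg hf1]
    rw [mask_fold (f :: rest) f (List.replicate f.length false) (by simp)
        (by intro s hs; rw [hlen s hs]; simp)]
    have hmask : (List.range f.length).map
        (fun i => (List.replicate f.length false).getD i false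
          || (f :: rest).any (fun s => decide (s.getD i 0 ≠ f.getD i 0)))
      = (List.range f.length).map
          (fun i => rest.any (fun s => decide (s.getD i 0 ≠ f.getD i 0))) := by
      apply List.map_congr_left
      intro i hi
      simp [List.any_cons]
    rw [hmask, zip_map_range f _ 0, List.filterMap_map]
    have hbody : ∀ i ∈ List.range f.length, ∀ (acc : List Int),
        (if (PySem.Set.ofList ((f :: rest).map (fun s => s.getD i 0))).length = 1 then
          acc ++ [(PySem.Set.ofList ((f :: rest).map (fun s => s.getD i 0))).headD 0] else acc)
        = (if (!rest.any (fun s => decide (s.getD i 0 ≠ f.getD i 0))) then acc ++ [f.getD i 0] else acc) := by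
      intro i _ acc
      simp only [List.map_cons]
      by_cases hc : ∀ b ∈ rest.map (fun s => s.getD i 0), b = f.getD i 0
      · rw [ofList_const _ _ hc]
        have ht : (!rest.any (fun s => decide (s.getD i 0 ≠ f.getD i 0))) = true := by
          simp only [Bool.not_eq_true', List.any_eq_false]
          intro s hs
          simpa [List.getD] using hc _ (List.mem_map_of_mem hs)
        rw [ht]
        simp
      · have h1 : (PySem.Set.ofList (f.getD i 0 :: rest.map (fun s => s.getD i 0))).length ≠ 1 := by
          exact fun h => hc ((ofList_length_one_iff _ _).mp h)
        have h2 : (!rest.any (fun s => decide (s.getD i 0 ≠ f.getD i 0))) = false := by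
          simp only [Bool.not_eq_false', List.any_eq_true, decide_eq_true_eq]
          push Not at hc
          obtain ⟨b, hb, hbn⟩ := hc
          obtain ⟨s, hs, rfl⟩ := List.mem_map.mp hb
          exact ⟨s, hs, hbn⟩
        rw [if_neg h1, h2]
        simp
    rw [PySem.List.foldl_congr_mem' _ _ _ _ hbody]
    rw [PySem.List.foldl_append_if]
    rw [filter_map_eq_filterMap]
    simp only [List.nil_append]
    apply List.filterMap_congr
    intro i _
    simp only [Function.comp_apply]
    by_cases hp : ∀ s ∈ rest, s.getD i 0 = f.getD i 0
    · have hany : (rest.any fun s => decide (s.getD i 0 ≠ f.getD i 0)) = false := by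
        simp only [List.any_eq_false]
        intro s hs
        simpa [List.getD] using hp s hs
      rw [hany]
      simp
    · have hany : (rest.any fun s => decide (s.getD i 0 ≠ f.getD i 0)) = true := by
        simp only [List.any_eq_true, decide_eq_true_eq]
        push Not at hp
        obtain ⟨s, hs, hne'⟩ := hp
        exact ⟨s, hs, hne'⟩
      rw [hany]
      simp

-- ===== VERDICT (by name: the statement is the Claim_ definition above) =====
theorem get_common_shape_spec : Claim_equal_get_common_shape := by
  intro shapes _ hpre
  unfold Spec_get_common_shape
  exact get_common_shape_eq_alt shapes hpre.1 hpre.2
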